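-- pv_equiv track=rewrite | github.com/weiss-i-net/alda-zettel | zettel02/kommentiert_aufgabe1.py | gen_cal
-- ===== SOURCE A (Python) =====
-- def gen_cal(is_leap, start_day):
--     cal = []
--     l_mon = [31, 29, 31, 30, 31, 30, 31, 31, 30, 31, 30, 31] if is_leap else \
--             [31, 28, 31, 30, 31, 30, 31, 31, 30, 31, 30, 31]
--     weekdays = ["mon", "tue", "wed", "thu", "fri", "sat", "sun"]
--     curr_day = 0
--     for mon in range(12):
--         for day in range(l_mon[mon]):
--             cal.append((day + 1, mon + 1, weekdays[(curr_day + start_day) % 7]))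
--             curr_day += 1
--     return cal
-- ===== SOURCE B (Python) =====
-- def gen_cal(is_leap, start_day):
--     # Flat single loop over a global day index; month/day recovered from
--     # prefix-sum month boundaries instead of nested month/day loops.
--     l_mon = [31, 29, 31, 30, 31, 30, 31, 31, 30, 31, 30, 31] if is_leap else \
--             [31, 28, 31, 30, 31, 30, 31, 31, 30, 31, 30, 31]
--     weekdays = ["mon", "tue", "wed", "thu", "fri", "sat", "sun"]
--     cum = []
--     t = 0
--     for m in l_mon:
--         cum.append(t)
--         t += m
--     cal = []
--     for i in range(t):
--         k = sum(1 for c in cum if c <= i)   # 1-based month number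
--         cal.append((i - cum[k - 1] + 1, k, weekdays[(i + start_day) % 7]))
--     return cal
-- ===== Notes on version B (the rewrite author's own statement) =====
-- stated objective: alternative
-- what changed: Replaced A's nested month/day loops (with a running day counter) by a single flat loop over the global day index, recovering the month as the count of prefix-sum month boundaries <= the index and the day as the offset from that boundary.
import Mathlib
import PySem

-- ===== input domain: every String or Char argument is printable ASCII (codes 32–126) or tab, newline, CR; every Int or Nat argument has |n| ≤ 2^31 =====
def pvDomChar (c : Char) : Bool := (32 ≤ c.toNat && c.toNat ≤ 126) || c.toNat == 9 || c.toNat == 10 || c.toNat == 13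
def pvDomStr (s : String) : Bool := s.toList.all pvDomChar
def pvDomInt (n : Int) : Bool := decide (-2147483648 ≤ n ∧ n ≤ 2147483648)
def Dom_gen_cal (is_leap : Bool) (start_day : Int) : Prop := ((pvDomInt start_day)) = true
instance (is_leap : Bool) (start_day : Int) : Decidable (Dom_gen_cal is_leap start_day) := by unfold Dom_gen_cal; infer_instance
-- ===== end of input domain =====

-- B replaces A's nested month/day loops by one flat loop over a global day index,
-- recovering month and day from prefix-sum month boundaries (objective: alternative decomposition).

-- shared helpers: both Pythons contain the identical l_mon / weekdays lines and weekday lookup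
def pvLmon (is_leap : Bool) : List Int :=
  if is_leap then [31, 29, 31, 30, 31, 30, 31, 31, 30, 31, 30, 31]
  else [31, 28, 31, 30, 31, 30, 31, 31, 30, 31, 30, 31]

def pvWeekdays : List String := ["mon", "tue", "wed", "thu", "fri", "sat", "sun"]

-- weekdays[(c + s) % 7]
def pvWd (s c : Int) : String := PySem.List.pyGetD pvWeekdays (PySem.Int.mod (c + s) 7) ""

-- ===== PORT A =====
def gen_cal (is_leap : Bool) (start_day : Int) : List (Int × Int × String) :=
  let l_mon := pvLmon is_leap
  ((PySem.List.pyRange 0 12 1).foldl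
    (fun (st : List (Int × Int × String) × Int) mon =>
      (PySem.List.pyRange 0 (PySem.List.pyGetD l_mon mon 0) 1).foldl
        (fun st2 day => (st2.1 ++ [(day + 1, mon + 1, pvWd start_day st2.2)], st2.2 + 1)) st)
    ([], 0)).1

-- ===== PORT B =====
-- k = sum(1 for c in cum if c <= i)
def pvCountLE (cum : List Int) (i : Int) : Int :=
  cum.foldl (fun acc c => if c ≤ i then acc + 1 else acc) 0

def gen_cal_alt (is_leap : Bool) (start_day : Int) : List (Int × Int × String) :=
  let l_mon := pvLmon is_leap
  -- cum = prefix sums of month lengths (cs.1), t = total number of days (cs.2)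
  let cs := l_mon.foldl (fun (p : List Int × Int) m => (p.1 ++ [p.2], p.2 + m)) ([], 0)
  (PySem.List.pyRange 0 cs.2 1).foldl
    (fun cal i =>
      let k := pvCountLE cs.1 i
      cal ++ [(i - PySem.List.pyGetD cs.1 (k - 1) 0 + 1, k, pvWd start_day i)])
    []

-- ===== PRECONDITION & SPEC =====
def Spec_gen_cal (is_leap : Bool) (start_day : Int) (out : List (Int × Int × String)) : Prop := out = gen_cal_alt is_leap start_day
instance (is_leap : Bool) (start_day : Int) (out : List (Int × Int × String)) : Decidable (Spec_gen_cal is_leap start_day out) := by unfold Spec_gen_cal; infer_instance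

-- ===== CLAIM (what is proved, stated in full; the proofs are below) =====
def Claim_equal_gen_cal : Prop := ∀ (is_leap : Bool) (start_day : Int), Dom_gen_cal is_leap start_day → Spec_gen_cal is_leap start_day (gen_cal is_leap start_day)

-- ===== LEMMAS AND PROOFS =====

-- prefix sums of the month lengths starting at offset t
def pvCums (t : Int) : List Int → List Int
  | [] => []
  | m :: r => t :: pvCums (t + m) r

-- the calendar entries of one month: month number mon+1, first global day t, length m
def pvMonthBlock (s mon t m : Int) : List (Int × Int × String) :=
  (PySem.List.pyRange 0 m 1).map (fun day => (day + 1, mon + 1, pvWd s (t + day)))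

-- the calendar entries of a list of consecutive months
def pvBlocks (s : Int) (mon t : Int) : List Int → List (Int × Int × String)
  | [] => []
  | m :: r => pvMonthBlock s mon t m ++ pvBlocks s (mon + 1) (t + m) r

lemma pv_foldl_cums (ms : List Int) (acc : List Int) (t : Int) :
    ms.foldl (fun (p : List Int × Int) m => (p.1 ++ [p.2], p.2 + m)) (acc, t)
      = (acc ++ pvCums t ms, t + ms.sum) := by
  induction ms generalizing acc t with
  | nil => simp [pvCums]
  | cons m r ih => simp [pvCums, ih, List.append_assoc]; ring

lemma pv_cums_ge (ms : List Int) (t : Int) (h : ∀ m ∈ ms, 0 < m) :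
    ∀ c ∈ pvCums t ms, t ≤ c := by
  induction ms generalizing t with
  | nil => simp [pvCums]
  | cons m r ih =>
    intro c hc
    simp only [pvCums, List.mem_cons] at hc
    rcases hc with rfl | hc
    · exact le_refl _
    · have hm : 0 < m := h m (by simp)
      have := ih (t + m) (fun x hx => h x (by simp [hx])) c hc
      omega

lemma pv_count_all_le (L : List Int) (i : Int) (acc : Int) (h : ∀ c ∈ L, c ≤ i) :
    L.foldl (fun acc c => if c ≤ i then acc + 1 else acc) acc = acc + L.length := by
  induction L generalizing acc with
  | nil => simp
  | cons c r ih =>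
    simp only [List.foldl_cons, if_pos (h c (by simp))]
    rw [ih (acc + 1) (fun x hx => h x (by simp [hx]))]
    simp only [List.length_cons]; push_cast; ring

lemma pv_count_all_gt (L : List Int) (i : Int) (acc : Int) (h : ∀ c ∈ L, i < c) :
    L.foldl (fun acc c => if c ≤ i then acc + 1 else acc) acc = acc := by
  induction L generalizing acc with
  | nil => simp
  | cons c r ih =>
    have hc : ¬ c ≤ i := by have := h c (by simp); omega
    simp only [List.foldl_cons, if_neg hc]
    exact ih acc (fun x hx => h x (by simp [hx]))

lemma pv_countLE_split (L1 L2 : List Int) (i : Int)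
    (h1 : ∀ c ∈ L1, c ≤ i) (h2 : ∀ c ∈ L2, i < c) :
    pvCountLE (L1 ++ L2) i = (L1.length : Int) := by
  unfold pvCountLE
  rw [List.foldl_append, pv_count_all_le L1 i 0 h1, pv_count_all_gt L2 i _ h2]
  ring

lemma pv_getD_mid (P S : List Int) (t : Int) : (P ++ t :: S).getD P.length 0 = t := by
  induction P with
  | nil => rfl
  | cons p q ih => simp

-- inner day loop of A over one month of length n, entering with calendar cal and global day c
lemma pv_innerA (s mon : Int) (n : Nat) (cal : List (Int × Int × String)) (c : Int) :
    (PySem.List.pyRange 0 (n : Int) 1).foldl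
      (fun st2 day => (st2.1 ++ [(day + 1, mon + 1, pvWd s st2.2)], st2.2 + 1)) (cal, c)
      = (cal ++ pvMonthBlock s mon c (n : Int), c + n) := by
  induction n with
  | zero => simp [pvMonthBlock, PySem.List.pyRange_one_eq_nil]
  | succ k ih =>
    have hcast : ((k + 1 : Nat) : Int) = (k : Int) + 1 := by push_cast; ring
    rw [hcast, PySem.List.pyRange_one_succ_right (by positivity), List.foldl_append, ih]
    simp only [List.foldl_cons, List.foldl_nil]
    unfold pvMonthBlock
    rw [PySem.List.pyRange_one_succ_right (by positivity), List.map_append]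
    simp [List.append_assoc, add_assoc]

lemma pvMonthBlock_congr (s m a a' b b' : Int) (h1 : a = a') (h2 : b = b') :
    pvMonthBlock s a b m = pvMonthBlock s a' b' m := by rw [h1, h2]

lemma pv_blocks_append (s : Int) (ms : List Int) (mon t m : Int) :
    pvBlocks s mon t (ms ++ [m])
      = pvBlocks s mon t ms ++ pvMonthBlock s (mon + ms.length) (t + ms.sum) m := by
  induction ms generalizing mon t with
  | nil => simp [pvBlocks]
  | cons x r ih =>
    simp only [List.cons_append, pvBlocks, ih, List.append_assoc]
    congr 2
    exact pvMonthBlock_congr _ _ _ _ _ _ (by simp only [List.length_cons]; push_cast; ring) (by simp only [List.sum_cons]; ring)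

-- outer month loop of A, for any list of (nonnegative) month lengths
lemma pv_A_outer (s : Int) (ms : List Int) (h : ∀ m ∈ ms, 0 ≤ m) :
    (PySem.List.pyRange 0 (ms.length : Int) 1).foldl
      (fun (st : List (Int × Int × String) × Int) mon =>
        (PySem.List.pyRange 0 (PySem.List.pyGetD ms mon 0) 1).foldl
          (fun st2 day => (st2.1 ++ [(day + 1, mon + 1, pvWd s st2.2)], st2.2 + 1)) st)
      ([], 0)
      = (pvBlocks s 0 0 ms, ms.sum) := by
  induction ms using List.reverseRecOn with
  | nil => simp [pvBlocks, PySem.List.pyRange_one_eq_nil]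
  | append_singleton ms m ih =>
    have hms : ∀ x ∈ ms, 0 ≤ x := fun x hx => h x (by simp [hx])
    have hm : 0 ≤ m := h m (by simp)
    have hlen : (((ms ++ [m]).length : Nat) : Int) = (ms.length : Int) + 1 := by
      simp only [List.length_append, List.length_cons, List.length_nil]; push_cast; ring
    rw [hlen, PySem.List.pyRange_one_succ_right (by positivity), List.foldl_append]
    rw [PySem.List.foldl_congr_mem _ _
      (fun (st : List (Int × Int × String) × Int) mon =>
        (PySem.List.pyRange 0 (PySem.List.pyGetD ms mon 0) 1).foldl
          (fun st2 day => (st2.1 ++ [(day + 1, mon + 1, pvWd s st2.2)], st2.2 + 1)) st)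
      ([], 0)
      (by
        intro acc x hx
        have hb := PySem.List.mem_pyRange_one.mp hx
        have hx1 : PySem.List.pyGetD (ms ++ [m]) x 0 = PySem.List.pyGetD ms x 0 := by
          rw [PySem.List.pyGetD_eq_getElem _ 0 hb.1 (by simp; omega),
              PySem.List.pyGetD_eq_getElem _ 0 hb.1 hb.2]
          exact List.getElem_append_left (by omega)
        rw [hx1])]
    rw [ih hms]
    simp only [List.foldl_cons, List.foldl_nil]
    have hget : PySem.List.pyGetD (ms ++ [m]) ((ms.length : Nat) : Int) 0 = m := by
      rw [PySem.List.pyGetD_natCast]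
      exact pv_getD_mid ms [] m
    rw [hget]
    rw [show m = ((m.toNat : Nat) : Int) from (Int.toNat_of_nonneg hm).symm]
    rw [pv_innerA]
    rw [pv_blocks_append]
    simp [Int.toNat_of_nonneg hm]

-- the inner-month map of B over global indices, reindexed to A's day-offset form
lemma pv_segment_block (s mon t m : Int) :
    (PySem.List.pyRange t (t + m) 1).map (fun i => (i - t + 1, mon + 1, pvWd s i))
      = pvMonthBlock s mon t m := by
  unfold pvMonthBlock
  rw [PySem.List.pyRange_one t (t + m), PySem.List.pyRange_one 0 m]
  simp only [List.map_map]
  have h1 : (t + m - t).toNat = (m - 0).toNat := by congr 1; ring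
  rw [h1]
  apply List.map_congr_left
  intro k _
  simp only [Function.comp_apply]
  have h2 : t + (k : Int) - t + 1 = 0 + (k : Int) + 1 := by ring
  have h3 : t + (k : Int) = t + (0 + (k : Int)) := by ring
  rw [h2, h3]

-- B's flat map over global day indices, split month by month;
-- P = the prefix-sum entries of the already processed months
lemma pv_B_blocks (s : Int) (ms : List Int) (P : List Int) (t : Int)
    (hP : ∀ c ∈ P, c ≤ t) (hpos : ∀ m ∈ ms, 0 < m) :
    (PySem.List.pyRange t (t + ms.sum) 1).map (fun i =>
        (i - PySem.List.pyGetD (P ++ pvCums t ms) (pvCountLE (P ++ pvCums t ms) i - 1) 0 + 1,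
         pvCountLE (P ++ pvCums t ms) i, pvWd s i))
      = pvBlocks s (P.length : Int) t ms := by
  induction ms generalizing P t with
  | nil => simp [pvBlocks, PySem.List.pyRange_one_eq_nil]
  | cons m r ih =>
    have hm : 0 < m := hpos m (by simp)
    have hrpos : ∀ x ∈ r, 0 < x := fun x hx => hpos x (by simp [hx])
    have hrsum : 0 ≤ r.sum := List.sum_nonneg (fun x hx => le_of_lt (hrpos x hx))
    have hcum : P ++ pvCums t (m :: r) = (P ++ [t]) ++ pvCums (t + m) r := by
      simp [pvCums, List.append_assoc]
    have hsum : t + (m :: r).sum = t + m + r.sum := by simp; ring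
    rw [hcum, hsum, PySem.List.pyRange_one_append t (t + m) (t + m + r.sum) (by omega) (by omega),
        List.map_append]
    have hfirst :
        (PySem.List.pyRange t (t + m) 1).map (fun i =>
          (i - PySem.List.pyGetD ((P ++ [t]) ++ pvCums (t + m) r)
                (pvCountLE ((P ++ [t]) ++ pvCums (t + m) r) i - 1) 0 + 1,
           pvCountLE ((P ++ [t]) ++ pvCums (t + m) r) i, pvWd s i))
          = pvMonthBlock s (P.length : Int) t m := by
      rw [← pv_segment_block s (P.length : Int) t m]
      apply List.map_congr_left
      intro i hi
      have hb := PySem.List.mem_pyRange_one.mp hi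
      have hcount : pvCountLE ((P ++ [t]) ++ pvCums (t + m) r) i = (P.length : Int) + 1 := by
        rw [pv_countLE_split (P ++ [t]) (pvCums (t + m) r) i
          (by intro c hc; simp at hc; rcases hc with hc | rfl
              · have := hP c hc; omega
              · omega)
          (by intro c hc; have := pv_cums_ge r (t + m) hrpos c hc; omega)]
        simp only [List.length_append, List.length_cons, List.length_nil]; push_cast; ring
      have hgd : PySem.List.pyGetD ((P ++ [t]) ++ pvCums (t + m) r)
          ((P.length : Int) + 1 - 1) 0 = t := by
        have he : ((P.length : Int) + 1 - 1) = ((P.length : Nat) : Int) := by ring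
        rw [he, PySem.List.pyGetD_natCast]
        have : (P ++ [t]) ++ pvCums (t + m) r = P ++ t :: pvCums (t + m) r := by
          simp [List.append_assoc]
        rw [this]
        exact pv_getD_mid P (pvCums (t + m) r) t
      rw [hcount, hgd]
    have hsecond :
        (PySem.List.pyRange (t + m) (t + m + r.sum) 1).map (fun i =>
          (i - PySem.List.pyGetD ((P ++ [t]) ++ pvCums (t + m) r)
                (pvCountLE ((P ++ [t]) ++ pvCums (t + m) r) i - 1) 0 + 1,
           pvCountLE ((P ++ [t]) ++ pvCums (t + m) r) i, pvWd s i))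
          = pvBlocks s ((P.length : Int) + 1) (t + m) r := by
      have hP' : ∀ c ∈ P ++ [t], c ≤ t + m := by
        intro c hc; simp at hc; rcases hc with hc | rfl
        · have := hP c hc; omega
        · omega
      have := ih (P ++ [t]) (t + m) hP' hrpos
      rw [this]
      congr 1
      simp only [List.length_append, List.length_cons, List.length_nil]; push_cast; ring
    rw [hfirst, hsecond]
    simp [pvBlocks]

-- A computes the month blocks
lemma pv_A_char (b : Bool) (s : Int) : gen_cal b s = pvBlocks s 0 0 (pvLmon b) := by
  have hlen : ((pvLmon b).length : Int) = 12 := by cases b <;> rfl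
  have h0 : ∀ m ∈ pvLmon b, 0 ≤ m := by cases b <;> decide
  simp only [gen_cal]
  rw [← hlen, pv_A_outer s (pvLmon b) h0]

-- B computes the month blocks
lemma pv_B_char (b : Bool) (s : Int) : gen_cal_alt b s = pvBlocks s 0 0 (pvLmon b) := by
  have hpos : ∀ m ∈ pvLmon b, 0 < m := by cases b <;> decide
  simp only [gen_cal_alt]
  rw [pv_foldl_cums]
  rw [PySem.List.foldl_append_singleton_eq_map (fun i =>
      (i - PySem.List.pyGetD ([] ++ pvCums 0 (pvLmon b))
            (pvCountLE ([] ++ pvCums 0 (pvLmon b)) i - 1) 0 + 1,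
       pvCountLE ([] ++ pvCums 0 (pvLmon b)) i, pvWd s i))]
  rw [pv_B_blocks s (pvLmon b) [] 0 (by simp) hpos]
  simp

-- ===== VERDICT (by name: the statement is the Claim_ definition above) =====
theorem gen_cal_spec : Claim_equal_gen_cal := by
  intro b s _
  unfold Spec_gen_cal
  rw [pv_A_char, pv_B_char]
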